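-- pv_equiv track=rewrite | github.com/ChelomoLubliner/thesis_shoes | contour.py | select_min_max_x
-- ===== SOURCE A (Python) =====
-- def dict_points_x(all_points):
--     points = all_points
--     # create an empty dictionary to store the x and y values
--     points_dict = {}
--     # iterate over the list of points and add the x and y values to the dictionary
--     for x_i, y_i in points:
--         if x_i not in points_dict:
--             points_dict[x_i] = [y_i]
--         else:
--             points_dict[x_i].append(y_i)
--     return points_dict
--
-- def select_min_max_x(all_points):
--     points_dict =  dict_points_x(all_points)
--     new_points_x = []
--     for x_i in points_dict.keys():
--         points_dict[x_i] = min(points_dict[x_i]), max(points_dict[x_i])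
--         for new_y_i in points_dict[x_i]:
--             new_points_x.append((x_i, new_y_i))
--     return new_points_x
-- ===== SOURCE B (Python) =====
-- def select_min_max_x(all_points):
--     # One pass: aggregate (min_y, max_y) per x incrementally, no per-x y-lists.
--     bounds = {}
--     for x, y in all_points:
--         b = bounds.get(x)
--         if b is None:
--             bounds[x] = (y, y)
--         else:
--             bounds[x] = (min(b[0], y), max(b[1], y))
--     out = []
--     for x, (mn, mx) in bounds.items():
--         out.append((x, mn))
--         out.append((x, mx))
--     return out
-- ===== Notes on version B (the rewrite author's own statement) =====
-- stated objective: simpler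
-- what changed: Instead of collecting the full y-list per x and then reducing each list with min() and max(), B keeps only a running (min_y, max_y) pair per x in one incremental pass and emits the two tuples per key afterwards.
import Mathlib
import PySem

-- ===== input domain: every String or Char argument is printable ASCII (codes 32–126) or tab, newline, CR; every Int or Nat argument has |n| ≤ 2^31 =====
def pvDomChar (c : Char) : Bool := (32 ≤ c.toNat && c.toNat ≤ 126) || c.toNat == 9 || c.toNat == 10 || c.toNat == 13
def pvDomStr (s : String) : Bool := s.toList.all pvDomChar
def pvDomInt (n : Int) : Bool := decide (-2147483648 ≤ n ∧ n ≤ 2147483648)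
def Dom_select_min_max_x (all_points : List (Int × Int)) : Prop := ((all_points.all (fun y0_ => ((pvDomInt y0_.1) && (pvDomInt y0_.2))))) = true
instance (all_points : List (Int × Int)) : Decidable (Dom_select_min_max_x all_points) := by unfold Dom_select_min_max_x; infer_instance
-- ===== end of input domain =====

-- B replaces A's "group all y's per x, then min()/max() each list" by a single
-- incremental pass keeping only a running (min_y, max_y) pair per x (objective: simpler).

-- ===== PORT A =====
-- helper: dict_points_x — groups the y's per x in insertion order
def dict_points_x (all_points : List (Int × Int)) : PySem.Dict Int (List Int) :=
  all_points.foldl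
    (fun d p =>
      if d.contains p.1 = false then d.insert p.1 [p.2]
      else d.modify p.1 [] (fun l => l ++ [p.2]))
    PySem.Dict.empty

-- For each key (the value-overwriting in the Python loop does not affect keys or later
-- iterations), emit (x, min ys) and (x, max ys); the `none` branch is unreachable since
-- every stored list is nonempty (Python's min/max would raise only on an empty list).
def select_min_max_x (all_points : List (Int × Int)) : List (Int × Int) :=
  let d := dict_points_x all_points
  d.keys.foldl
    (fun acc k =>
      let ys := d.getD k []
      match PySem.List.min? ys (fun y => y), PySem.List.max? ys (fun y => y) with
      | some mn, some mx => acc ++ [(k, mn), (k, mx)]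
      | _, _ => acc)
    []

-- ===== PORT B =====
-- helper: one pass maintaining a running (min_y, max_y) pair per x
def smm_bounds (all_points : List (Int × Int)) : PySem.Dict Int (Int × Int) :=
  all_points.foldl
    (fun d p =>
      match d.get? p.1 with
      | none => d.insert p.1 (p.2, p.2)
      | some b => d.insert p.1 (min b.1 p.2, max b.2 p.2))
    PySem.Dict.empty

def select_min_max_x_alt (all_points : List (Int × Int)) : List (Int × Int) :=
  (smm_bounds all_points).items.foldl
    (fun acc it => acc ++ [(it.1, it.2.1), (it.1, it.2.2)]) []

-- ===== PRECONDITION & SPEC =====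
def Spec_select_min_max_x (all_points : List (Int × Int)) (out : List (Int × Int)) : Prop := out = select_min_max_x_alt all_points
instance (all_points : List (Int × Int)) (out : List (Int × Int)) : Decidable (Spec_select_min_max_x all_points out) := by unfold Spec_select_min_max_x; infer_instance

-- ===== CLAIM (what is proved, stated in full; the proofs are below) =====
def Claim_equal_select_min_max_x : Prop := ∀ (all_points : List (Int × Int)), Dom_select_min_max_x all_points → Spec_select_min_max_x all_points (select_min_max_x all_points)

-- ===== LEMMAS AND PROOFS =====

-- the (min, max) of a nonempty y-list, as B stores it
def pvMM (ys : List Int) : Int × Int :=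
  ((PySem.List.min? ys (fun y => y)).getD 0, (PySem.List.max? ys (fun y => y)).getD 0)

-- invariant relating A's grouping dict and B's bounds dict
def pvInv (dA : PySem.Dict Int (List Int)) (dB : PySem.Dict Int (Int × Int)) : Prop :=
  dB.items = dA.items.map (fun e => (e.1, pvMM e.2)) ∧
  (∀ e ∈ dA.items, e.2 ≠ []) ∧ dA.keys.Nodup

lemma pvMM_single (y : Int) : pvMM [y] = (y, y) := by
  simp [pvMM, PySem.List.min?_id_cons, PySem.List.max?_id_cons]

lemma pvMM_append (ys : List Int) (hne : ys ≠ []) (y : Int) :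
    pvMM (ys ++ [y]) = (min (pvMM ys).1 y, max (pvMM ys).2 y) := by
  cases ys with
  | nil => exact absurd rfl hne
  | cons a t =>
    simp [pvMM, PySem.List.min?_id_cons, PySem.List.max?_id_cons, List.foldl_append]

lemma pvFindMap (l : List (Int × List Int)) (k : Int) :
    List.find? (fun e => e.1 == k) (l.map (fun e => (e.1, pvMM e.2)))
      = (List.find? (fun e => e.1 == k) l).map (fun e => (e.1, pvMM e.2)) := by
  induction l with
  | nil => rfl
  | cons e t ih =>
    by_cases hek : e.1 == k
    · simp [hek]
    · simp only [List.map_cons, List.find?_cons, hek]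
      simpa [hek] using ih

lemma pvInv_step (dA : PySem.Dict Int (List Int)) (dB : PySem.Dict Int (Int × Int))
    (p : Int × Int) (h : pvInv dA dB) :
    pvInv
      (if dA.contains p.1 = false then dA.insert p.1 [p.2]
       else dA.modify p.1 [] (fun l => l ++ [p.2]))
      (match dB.get? p.1 with
       | none => dB.insert p.1 (p.2, p.2)
       | some b => dB.insert p.1 (min b.1 p.2, max b.2 p.2)) := by
  obtain ⟨hitems, hne, hnd⟩ := h
  have hc : dB.contains p.1 = dA.contains p.1 := by
    simp only [PySem.Dict.contains, hitems, List.any_map]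
    rfl
  by_cases hca : dA.contains p.1 = true
  · -- key already present in both dicts
    obtain ⟨ys, hfa⟩ : ∃ ys, List.find? (fun e => e.1 == p.1) dA.items = some (p.1, ys) := by
      have hca2 := hca
      simp only [PySem.Dict.contains] at hca2
      cases hfa : List.find? (fun e => e.1 == p.1) dA.items with
      | none =>
        exfalso
        rcases List.any_eq_true.mp hca2 with ⟨e, he, hek⟩
        exact absurd hek (by simpa using List.find?_eq_none.mp hfa e he)
      | some e =>
        obtain ⟨k1, ys⟩ := e
        have hkey : k1 = p.1 := by simpa using List.find?_some hfa
        subst hkey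
        exact ⟨ys, rfl⟩
    have hysne : ys ≠ [] := hne _ (List.mem_of_find?_eq_some hfa)
    have hgA : dA.getD p.1 [] = ys := by simp [PySem.Dict.getD, PySem.Dict.get?, hfa]
    have hgB : dB.get? p.1 = some (pvMM ys) := by
      simp only [PySem.Dict.get?, hitems]
      rw [pvFindMap, hfa]
      rfl
    have hcb : dB.contains p.1 = true := hc.trans hca
    have hif : (if dA.contains p.1 = false then dA.insert p.1 [p.2]
       else dA.modify p.1 [] (fun l => l ++ [p.2])) = dA.insert p.1 (ys ++ [p.2]) := by
      rw [hca]; simp [PySem.Dict.modify, hgA]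
    rw [hgB, hif]
    refine ⟨?_, ?_, ?_⟩
    · rw [PySem.Dict.items_insert_of_contains _ _ hcb,
        PySem.Dict.items_insert_of_contains _ _ hca, hitems]
      rw [List.map_map, List.map_map]
      apply List.map_congr_left
      intro e he
      by_cases hek : e.1 == p.1
      · simp [Function.comp, hek, pvMM_append ys hysne p.2]
      · simp [Function.comp, hek]
    · intro e he
      rw [PySem.Dict.items_insert_of_contains _ _ hca] at he
      rcases List.mem_map.mp he with ⟨e', he', rfl⟩
      by_cases hek : e'.1 == p.1
      · simp [hek]
      · simpa [hek] using hne _ he'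
    · rw [PySem.Dict.keys_insert_of_contains _ _ hca]
      exact hnd
  · -- fresh key in both dicts
    have hca' : dA.contains p.1 = false := by simpa using hca
    have hcb : dB.contains p.1 = false := hc.trans hca'
    have hgB : dB.get? p.1 = none := (PySem.Dict.get?_eq_none_iff_contains dB p.1).mpr hcb
    have hif : (if dA.contains p.1 = false then dA.insert p.1 [p.2]
       else dA.modify p.1 [] (fun l => l ++ [p.2])) = dA.insert p.1 [p.2] := by
      rw [hca']; simp
    rw [hgB, hif]
    refine ⟨?_, ?_, ?_⟩
    · rw [PySem.Dict.items_insert_of_not_contains _ _ hcb,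
        PySem.Dict.items_insert_of_not_contains _ _ hca', hitems]
      simp [pvMM_single]
    · intro e he
      rw [PySem.Dict.items_insert_of_not_contains _ _ hca'] at he
      rcases List.mem_append.mp he with h' | h'
      · exact hne _ h'
      · simp at h'; subst h'; simp
    · rw [PySem.Dict.keys_insert_of_not_contains _ _ hca']
      refine List.nodup_append.mpr ⟨hnd, List.nodup_singleton _, ?_⟩
      intro a ha b hb
      simp only [List.mem_singleton] at hb
      subst hb
      intro hab
      subst hab
      exact absurd ((PySem.Dict.contains_iff_mem_keys dA p.1).mpr ha) (by simp [hca'])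

lemma pvInv_build (pts : List (Int × Int)) :
    ∀ (dA : PySem.Dict Int (List Int)) (dB : PySem.Dict Int (Int × Int)), pvInv dA dB →
    pvInv
      (pts.foldl (fun d p => if d.contains p.1 = false then d.insert p.1 [p.2]
                             else d.modify p.1 [] (fun l => l ++ [p.2])) dA)
      (pts.foldl (fun d p => match d.get? p.1 with
                             | none => d.insert p.1 (p.2, p.2)
                             | some b => d.insert p.1 (min b.1 p.2, max b.2 p.2)) dB) := by
  induction pts with
  | nil => intro dA dB h; exact h
  | cons p t ih =>
    intro dA dB h
    exact ih _ _ (pvInv_step dA dB p h)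

-- A's per-key emission loop, rephrased over the items list it reads from
lemma pvEmitA (d : PySem.Dict Int (List Int)) (l : List (Int × List Int)) :
    ∀ acc, (∀ e ∈ l, d.getD e.1 [] = e.2) → (∀ e ∈ l, e.2 ≠ []) →
    (l.map Prod.fst).foldl
      (fun acc k =>
        let ys := d.getD k []
        match PySem.List.min? ys (fun y => y), PySem.List.max? ys (fun y => y) with
        | some mn, some mx => acc ++ [(k, mn), (k, mx)]
        | _, _ => acc) acc
    = l.foldl (fun acc e => acc ++ [(e.1, (pvMM e.2).1), (e.1, (pvMM e.2).2)]) acc := by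
  induction l with
  | nil => intro acc _ _; rfl
  | cons e t ih =>
    intro acc hg hne
    have hge : d.getD e.1 [] = e.2 := hg e (by simp)
    have hene : e.2 ≠ [] := hne e (by simp)
    obtain ⟨mn, hmn⟩ : ∃ mn, PySem.List.min? e.2 (fun y => y) = some mn := by
      cases hm : PySem.List.min? e.2 (fun y => y) with
      | none => exact absurd ((PySem.List.min?_eq_none_iff e.2 _).mp hm) hene
      | some mn => exact ⟨mn, rfl⟩
    obtain ⟨mx, hmx⟩ : ∃ mx, PySem.List.max? e.2 (fun y => y) = some mx := by
      cases hm : PySem.List.max? e.2 (fun y => y) with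
      | none => exact absurd ((PySem.List.max?_eq_none_iff e.2 _).mp hm) hene
      | some mx => exact ⟨mx, rfl⟩
    have hpair : (pvMM e.2).1 = mn ∧ (pvMM e.2).2 = mx := by simp [pvMM, hmn, hmx]
    simp only [List.map_cons, List.foldl_cons, hge, hmn, hmx, hpair.1, hpair.2]
    exact ih _ (fun e' he' => hg e' (by simp [he'])) (fun e' he' => hne e' (by simp [he']))

-- ===== VERDICT (by name: the statement is the Claim_ definition above) =====
theorem select_min_max_x_spec : Claim_equal_select_min_max_x := by
  intro pts _
  unfold Spec_select_min_max_x select_min_max_x select_min_max_x_alt dict_points_x smm_bounds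
  have hinv := pvInv_build pts PySem.Dict.empty PySem.Dict.empty
    ⟨by simp [PySem.Dict.empty], by simp [PySem.Dict.empty], by simp [PySem.Dict.keys, PySem.Dict.empty]⟩
  obtain ⟨hitems, hne, hnd⟩ := hinv
  set dA := pts.foldl (fun d p => if d.contains p.1 = false then d.insert p.1 [p.2]
                                  else d.modify p.1 [] (fun l => l ++ [p.2])) PySem.Dict.empty with hdA
  set dB := pts.foldl (fun d p => match d.get? p.1 with
                                  | none => d.insert p.1 (p.2, p.2)
                                  | some b => d.insert p.1 (min b.1 p.2, max b.2 p.2)) PySem.Dict.empty with hdB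
  have hg : ∀ e ∈ dA.items, dA.getD e.1 [] = e.2 := by
    intro e he
    exact PySem.Dict.getD_of_mem_items dA (by cases e; exact he) hnd []
  have hA := pvEmitA dA dA.items [] hg hne
  have hB : dB.items.foldl (fun acc it => acc ++ [(it.1, it.2.1), (it.1, it.2.2)]) []
      = dA.items.foldl (fun acc e => acc ++ [(e.1, (pvMM e.2).1), (e.1, (pvMM e.2).2)]) [] := by
    rw [hitems, List.foldl_map]
  simp only [PySem.Dict.keys] at hA ⊢
  rw [hA, hB]
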